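-- pv_equiv track=rewrite | github.com/cvbjasyogya-glitch/WMS | routes/attendance_portal.py | _build_attendance_punch_options
-- ===== SOURCE A (Python) =====
-- def _has_open_break(day_logs):
--     break_open = False
--     for log in day_logs:
--         punch_type = log["punch_type"]
--         if punch_type == "break_start":
--             break_open = True
--         elif punch_type in {"break_finish", "check_out"}:
--             break_open = False
--     return break_open
--
-- def _build_attendance_punch_options(attendance_today, day_logs):
--     has_check_in = bool(attendance_today and attendance_today["check_in"]) or any(
--         log["punch_type"] == "check_in" for log in day_logs
--     )
--     has_check_out = bool(attendance_today and attendance_today["check_out"]) or any(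
--         log["punch_type"] == "check_out" for log in day_logs
--     )
--     break_open = _has_open_break(day_logs)
--
--     if not has_check_in:
--         return ["check_in"]
--     if has_check_out:
--         return []
--
--     options = ["free_attendance"]
--     if break_open:
--         options.append("break_finish")
--     else:
--         options.append("break_start")
--     options.append("check_out")
--     return options
-- ===== SOURCE B (Python) =====
-- def _build_attendance_punch_options(attendance_today, day_logs):
--     has_check_in = bool(attendance_today and attendance_today["check_in"])
--     has_check_out = bool(attendance_today and attendance_today["check_out"])
--     break_open = False
--     for log in day_logs:
--         punch_type = log["punch_type"]
--         if punch_type == "check_in":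
--             has_check_in = True
--         elif punch_type == "check_out":
--             has_check_out = True
--             break_open = False
--         elif punch_type == "break_start":
--             break_open = True
--         elif punch_type == "break_finish":
--             break_open = False
--     if not has_check_in:
--         return ["check_in"]
--     if has_check_out:
--         return []
--     return ["free_attendance",
--             "break_finish" if break_open else "break_start",
--             "check_out"]
-- ===== Notes on version B (the rewrite author's own statement) =====
-- stated objective: alternative
-- what changed: Replaces the _has_open_break helper plus the two any() generator scans with one fused loop over day_logs maintaining three boolean state flags, and builds the final option list as a single literal instead of successive appends.
import Mathlib
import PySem

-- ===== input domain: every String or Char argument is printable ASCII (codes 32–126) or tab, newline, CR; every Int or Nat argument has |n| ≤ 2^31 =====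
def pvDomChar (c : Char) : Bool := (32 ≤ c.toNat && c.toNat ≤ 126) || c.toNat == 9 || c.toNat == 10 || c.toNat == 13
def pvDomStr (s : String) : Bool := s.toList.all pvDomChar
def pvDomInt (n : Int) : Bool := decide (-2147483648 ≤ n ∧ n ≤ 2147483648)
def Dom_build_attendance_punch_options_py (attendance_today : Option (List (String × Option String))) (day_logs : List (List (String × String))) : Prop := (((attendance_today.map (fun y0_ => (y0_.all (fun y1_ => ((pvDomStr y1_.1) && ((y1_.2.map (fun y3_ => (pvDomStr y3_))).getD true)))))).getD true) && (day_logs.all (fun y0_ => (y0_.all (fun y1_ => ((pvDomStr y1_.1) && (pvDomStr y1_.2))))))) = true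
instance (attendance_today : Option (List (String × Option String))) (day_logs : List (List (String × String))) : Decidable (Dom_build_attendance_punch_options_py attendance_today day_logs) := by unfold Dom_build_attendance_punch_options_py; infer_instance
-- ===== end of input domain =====

-- B fuses A's helper and two any() scans into one loop over day_logs keeping three boolean flags,
-- and builds the option list as one literal (alternative decomposition, same cost).


-- ===== PORT A =====
-- Python truthiness of `attendance_today and attendance_today[key]` (None / empty dict / None value / "" are falsy)
def pvAttTruthy (attendance_today : Option (List (String × Option String))) (key : String) : Bool :=
  match attendance_today with
  | none => false
  | some d =>
    if d.isEmpty then false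
    else match PySem.Dict.getD (PySem.Dict.mk d) key none with  -- key access; Pre_ guarantees presence (KeyError otherwise)
         | none => false
         | some s => !(s == "")

-- loop body of _has_open_break
def pvBreakStep (b : Bool) (log : List (String × String)) : Bool :=
  let punch_type := PySem.Dict.getD (PySem.Dict.mk log) "punch_type" ""   -- Pre_ guarantees the key is present
  if punch_type == "break_start" then true
  else if punch_type == "break_finish" || punch_type == "check_out" then false
  else b

def pvHasOpenBreak (day_logs : List (List (String × String))) : Bool :=
  day_logs.foldl pvBreakStep false

def build_attendance_punch_options_py (attendance_today : Option (List (String × Option String))) (day_logs : List (List (String × String))) : List String :=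
  let has_check_in := pvAttTruthy attendance_today "check_in" ||
    day_logs.any (fun log => PySem.Dict.getD (PySem.Dict.mk log) "punch_type" "" == "check_in")
  let has_check_out := pvAttTruthy attendance_today "check_out" ||
    day_logs.any (fun log => PySem.Dict.getD (PySem.Dict.mk log) "punch_type" "" == "check_out")
  let break_open := pvHasOpenBreak day_logs
  if !has_check_in then ["check_in"]
  else if has_check_out then []
  else
    let options := ["free_attendance"]
    let options := if break_open then options ++ ["break_finish"] else options ++ ["break_start"]
    options ++ ["check_out"]

-- ===== PORT B =====
-- single fused loop: state = (has_check_in, has_check_out, break_open)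
def pvFusedStep (s : Bool × Bool × Bool) (log : List (String × String)) : Bool × Bool × Bool :=
  let punch_type := PySem.Dict.getD (PySem.Dict.mk log) "punch_type" ""   -- Pre_ guarantees the key is present
  if punch_type == "check_in" then (true, s.2.1, s.2.2)
  else if punch_type == "check_out" then (s.1, true, false)
  else if punch_type == "break_start" then (s.1, s.2.1, true)
  else if punch_type == "break_finish" then (s.1, s.2.1, false)
  else s

def build_attendance_punch_options_py_alt (attendance_today : Option (List (String × Option String))) (day_logs : List (List (String × String))) : List String :=
  let s := day_logs.foldl pvFusedStep
    (pvAttTruthy attendance_today "check_in", pvAttTruthy attendance_today "check_out", false)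
  if !s.1 then ["check_in"]
  else if s.2.1 then []
  else ["free_attendance", if s.2.2 then "break_finish" else "break_start", "check_out"]

-- ===== PRECONDITION & SPEC =====
-- Pre_ excludes exactly the inputs where Python A raises KeyError: a log without a "punch_type"
-- key, or a non-empty attendance_today missing "check_in" or "check_out".
def Pre_build_attendance_punch_options_py (attendance_today : Option (List (String × Option String))) (day_logs : List (List (String × String))) : Prop :=
  (∀ log ∈ day_logs, "punch_type" ∈ log.map Prod.fst) ∧
  (∀ d ∈ attendance_today.toList, d = [] ∨ ("check_in" ∈ d.map Prod.fst ∧ "check_out" ∈ d.map Prod.fst))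
instance (attendance_today : Option (List (String × Option String))) (day_logs : List (List (String × String))) : Decidable (Pre_build_attendance_punch_options_py attendance_today day_logs) := by unfold Pre_build_attendance_punch_options_py; infer_instance

def pvWitness_build_attendance_punch_options_py : (Option (List (String × Option String))) × (List (List (String × String))) :=
  (some [("check_in", some "08:00"), ("check_out", none)], [[("punch_type", "break_start")]])

def Spec_build_attendance_punch_options_py (attendance_today : Option (List (String × Option String))) (day_logs : List (List (String × String))) (out : List String) : Prop := out = build_attendance_punch_options_py_alt attendance_today day_logs
instance (attendance_today : Option (List (String × Option String))) (day_logs : List (List (String × String))) (out : List String) : Decidable (Spec_build_attendance_punch_options_py attendance_today day_logs out) := by unfold Spec_build_attendance_punch_options_py; infer_instance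

-- ===== CLAIM (what is proved, stated in full; the proofs are below) =====
def Claim_equal_build_attendance_punch_options_py : Prop := ∀ (attendance_today : Option (List (String × Option String))) (day_logs : List (List (String × String))), Dom_build_attendance_punch_options_py attendance_today day_logs → Pre_build_attendance_punch_options_py attendance_today day_logs → Spec_build_attendance_punch_options_py attendance_today day_logs (build_attendance_punch_options_py attendance_today day_logs)

-- ===== LEMMAS AND PROOFS =====
-- The fused fold computes exactly A's three quantities, from any start state.
lemma fused_fold_eq (day_logs : List (List (String × String))) (a b c : Bool) :
    day_logs.foldl pvFusedStep (a, b, c) =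
      (a || day_logs.any (fun log => PySem.Dict.getD (PySem.Dict.mk log) "punch_type" "" == "check_in"),
       b || day_logs.any (fun log => PySem.Dict.getD (PySem.Dict.mk log) "punch_type" "" == "check_out"),
       day_logs.foldl pvBreakStep c) := by
  induction day_logs generalizing a b c with
  | nil => simp
  | cons log tl ih =>
    simp only [List.foldl_cons, List.any_cons, pvFusedStep, pvBreakStep]
    by_cases h1 : PySem.Dict.getD (PySem.Dict.mk log) "punch_type" "" = "check_in"
    · simp only [h1]; norm_num
      rw [ih]; cases a <;> cases b <;> (first | rfl | simp_all)
    by_cases h2 : PySem.Dict.getD (PySem.Dict.mk log) "punch_type" "" = "check_out"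
    · simp only [h2]; norm_num [h1]
      rw [ih]; cases a <;> cases b <;> (first | rfl | simp_all)
    by_cases h3 : PySem.Dict.getD (PySem.Dict.mk log) "punch_type" "" = "break_start"
    · simp only [h3]; norm_num [h1, h2]
      rw [ih]; cases a <;> cases b <;> (first | rfl | simp_all)
    by_cases h4 : PySem.Dict.getD (PySem.Dict.mk log) "punch_type" "" = "break_finish"
    · simp only [h4]; norm_num [h1, h2, h3]
      rw [ih]; cases a <;> cases b <;> (first | rfl | simp_all)
    · simp only [beq_eq_false_iff_ne, ne_eq, h1, h2, h3, h4, not_false_eq_true,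
        if_neg, Bool.false_or, beq_iff_eq, if_false]
      norm_num [h1, h2, h3, h4]
      rw [ih]; cases a <;> cases b <;> (first | rfl | simp_all)

-- ===== VERDICT (by name: the statement is the Claim_ definition above) =====
theorem build_attendance_punch_options_py_spec : Claim_equal_build_attendance_punch_options_py := by
  intro attendance_today day_logs _ _
  unfold Spec_build_attendance_punch_options_py
  unfold build_attendance_punch_options_py build_attendance_punch_options_py_alt pvHasOpenBreak
  rw [fused_fold_eq]
  cases hci : pvAttTruthy attendance_today "check_in" ||
      day_logs.any (fun log => PySem.Dict.getD (PySem.Dict.mk log) "punch_type" "" == "check_in") <;>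
  cases hco : pvAttTruthy attendance_today "check_out" ||
      day_logs.any (fun log => PySem.Dict.getD (PySem.Dict.mk log) "punch_type" "" == "check_out") <;>
  cases hbo : List.foldl pvBreakStep false day_logs <;>
    simp [hci, hco, hbo]
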